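-- pv_equiv track=rewrite | github.com/ukamathAppliedML/neurosym-kg | neurosym_kg/reasoners/reasoning_on_graphs.py | _relation_matches
-- ===== SOURCE A (Python) =====
-- def _relation_matches(plan_relation: str, kg_relation: str) -> bool:
--     """Check if a KG relation matches a plan relation (fuzzy matching)."""
--     plan_rel = plan_relation.lower().replace("_", "").replace(" ", "")
--     kg_rel = kg_relation.lower().replace("_", "").replace(" ", "")
--
--     # Exact match
--     if plan_rel == kg_rel:
--         return True
--
--     # Substring match
--     if plan_rel in kg_rel or kg_rel in plan_rel:
--         return True
--
--     # Common synonyms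
--     synonyms = {
--         "locatedin": ["country", "location", "place", "in"],
--         "bornin": ["birthplace", "placeofbirth"],
--         "presidentof": ["president", "leader", "headof"],
--         "capitalof": ["capital"],
--         "spouseof": ["spouse", "marriedto", "wife", "husband"],
--         "directorof": ["director", "directedby"],
--     }
--
--     for key, syns in synonyms.items():
--         if plan_rel in [key] + syns and kg_rel in [key] + syns:
--             return True
--
--     return False
-- ===== SOURCE B (Python) =====
-- _GROUPS = [
--     ["locatedin", "country", "location", "place", "in"],
--     ["bornin", "birthplace", "placeofbirth"],
--     ["presidentof", "president", "leader", "headof"],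
--     ["capitalof", "capital"],
--     ["spouseof", "spouse", "marriedto", "wife", "husband"],
--     ["directorof", "director", "directedby"],
-- ]
-- _GROUP_OF = {w: i for i, g in enumerate(_GROUPS) for w in g}
--
--
-- def _relation_matches(plan_relation: str, kg_relation: str) -> bool:
--     """Check if a KG relation matches a plan relation (fuzzy matching)."""
--     plan_rel = plan_relation.lower().replace("_", "").replace(" ", "")
--     kg_rel = kg_relation.lower().replace("_", "").replace(" ", "")
--
--     if plan_rel == kg_rel:
--         return True
--     if plan_rel in kg_rel or kg_rel in plan_rel:
--         return True
--
--     gp = _GROUP_OF.get(plan_rel)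
--     return gp is not None and gp == _GROUP_OF.get(kg_rel)
-- ===== Notes on version B (the rewrite author's own statement) =====
-- stated objective: idiomatic
-- what changed: Replaces the per-group loop that tests both strings' membership in each synonym group with a precomputed reverse index (word -> group id) built once by a dict comprehension; the function then does two O(1) lookups and compares the group ids.
import Mathlib
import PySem

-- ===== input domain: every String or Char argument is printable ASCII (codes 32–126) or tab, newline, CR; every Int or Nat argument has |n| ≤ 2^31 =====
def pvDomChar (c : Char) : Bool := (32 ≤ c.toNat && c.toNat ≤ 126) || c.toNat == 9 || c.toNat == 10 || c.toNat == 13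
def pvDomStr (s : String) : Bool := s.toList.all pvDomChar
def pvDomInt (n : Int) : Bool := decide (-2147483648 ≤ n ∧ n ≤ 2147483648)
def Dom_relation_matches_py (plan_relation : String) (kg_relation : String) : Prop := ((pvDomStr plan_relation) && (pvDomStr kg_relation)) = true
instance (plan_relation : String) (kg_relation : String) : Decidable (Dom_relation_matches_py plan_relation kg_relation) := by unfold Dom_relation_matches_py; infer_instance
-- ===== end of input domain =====

-- B replaces A's per-group loop (membership of both strings in each synonym group) with a
-- precomputed reverse index word -> group id and two lookups; normalization and the
-- exact/substring checks are unchanged.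

set_option maxRecDepth 8192

-- ===== PORT A =====
-- s.lower().replace("_", "").replace(" ", "")
def pvNorm (s : String) : String :=
  PySem.Str.replace (PySem.Str.replace (PySem.Str.lower s) "_" "") " " ""

def pvSynonyms : List (String × List String) :=
  [("locatedin", ["country", "location", "place", "in"]),
   ("bornin", ["birthplace", "placeofbirth"]),
   ("presidentof", ["president", "leader", "headof"]),
   ("capitalof", ["capital"]),
   ("spouseof", ["spouse", "marriedto", "wife", "husband"]),
   ("directorof", ["director", "directedby"])]

-- the for-loop with early return: 'if plan_rel in [key]+syns and kg_rel in [key]+syns: return True'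
def pvSynLoop : List (String × List String) → String → String → Bool
  | [], _, _ => false
  | (key, syns) :: rest, p, k =>
      if ([key] ++ syns).contains p && ([key] ++ syns).contains k then true
      else pvSynLoop rest p k

def relation_matches_py (plan_relation : String) (kg_relation : String) : Bool :=
  let plan_rel := pvNorm plan_relation
  let kg_rel := pvNorm kg_relation
  if plan_rel == kg_rel then true
  else if PySem.Str.isIn plan_rel kg_rel || PySem.Str.isIn kg_rel plan_rel then true
  else pvSynLoop pvSynonyms plan_rel kg_rel

-- ===== PORT B =====
def pvGroups : List (List String) :=
  [["locatedin", "country", "location", "place", "in"],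
   ["bornin", "birthplace", "placeofbirth"],
   ["presidentof", "president", "leader", "headof"],
   ["capitalof", "capital"],
   ["spouseof", "spouse", "marriedto", "wife", "husband"],
   ["directorof", "director", "directedby"]]

-- _GROUP_OF = {w: i for i, g in enumerate(_GROUPS) for w in g}
def pvGroupOf : PySem.Dict String Int :=
  PySem.Dict.ofList ((PySem.List.enumerate pvGroups).flatMap (fun ig => ig.2.map (fun w => (w, ig.1))))

-- gp = _GROUP_OF.get(plan_rel); return gp is not None and gp == _GROUP_OF.get(kg_rel)
def relation_matches_py_alt (plan_relation : String) (kg_relation : String) : Bool :=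
  let plan_rel := pvNorm plan_relation
  let kg_rel := pvNorm kg_relation
  if plan_rel == kg_rel then true
  else if PySem.Str.isIn plan_rel kg_rel || PySem.Str.isIn kg_rel plan_rel then true
  else match pvGroupOf.get? plan_rel with
       | none => false
       | some gp => pvGroupOf.get? kg_rel == some gp

-- ===== PRECONDITION & SPEC =====
def Spec_relation_matches_py (plan_relation : String) (kg_relation : String) (out : Bool) : Prop := out = relation_matches_py_alt plan_relation kg_relation
instance (plan_relation : String) (kg_relation : String) (out : Bool) : Decidable (Spec_relation_matches_py plan_relation kg_relation out) := by unfold Spec_relation_matches_py; infer_instance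

-- ===== CLAIM (what is proved, stated in full; the proofs are below) =====
def Claim_equal_relation_matches_py : Prop := ∀ (plan_relation : String) (kg_relation : String), Dom_relation_matches_py plan_relation kg_relation → Spec_relation_matches_py plan_relation kg_relation (relation_matches_py plan_relation kg_relation)

-- ===== LEMMAS AND PROOFS =====
-- all words occurring in the synonym table (keys and synonyms, in order)
def pvAllWords : List String :=
  ["locatedin", "country", "location", "place", "in",
   "bornin", "birthplace", "placeofbirth",
   "presidentof", "president", "leader", "headof",
   "capitalof", "capital",
   "spouseof", "spouse", "marriedto", "wife", "husband",
   "directorof", "director", "directedby"]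

-- the reverse index, evaluated to its literal association list
lemma pvGroupOf_eq : pvGroupOf = PySem.Dict.mk
    [("locatedin", 0), ("country", 0), ("location", 0), ("place", 0), ("in", 0),
     ("bornin", 1), ("birthplace", 1), ("placeofbirth", 1),
     ("presidentof", 2), ("president", 2), ("leader", 2), ("headof", 2),
     ("capitalof", 3), ("capital", 3),
     ("spouseof", 4), ("spouse", 4), ("marriedto", 4), ("wife", 4), ("husband", 4),
     ("directorof", 5), ("director", 5), ("directedby", 5)] := by decide

lemma pvLoop_false_right (p k : String) (h : k ∉ pvAllWords) :
    pvSynLoop pvSynonyms p k = false := by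
  simp only [pvAllWords, List.mem_cons, not_or, List.not_mem_nil] at h
  obtain ⟨h1,h2,h3,h4,h5,h6,h7,h8,h9,h10,h11,h12,h13,h14,h15,h16,h17,h18,h19,h20,h21,h22,-⟩ := h
  simp only [pvSynonyms, pvSynLoop, List.cons_append, List.nil_append]
  simp [List.contains_eq_mem, h1,h2,h3,h4,h5,h6,h7,h8,h9,h10,h11,
        h12,h13,h14,h15,h16,h17,h18,h19,h20,h21,h22]

lemma pvLoop_false_left (p k : String) (h : p ∉ pvAllWords) :
    pvSynLoop pvSynonyms p k = false := by
  simp only [pvAllWords, List.mem_cons, not_or, List.not_mem_nil] at h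
  obtain ⟨h1,h2,h3,h4,h5,h6,h7,h8,h9,h10,h11,h12,h13,h14,h15,h16,h17,h18,h19,h20,h21,h22,-⟩ := h
  simp only [pvSynonyms, pvSynLoop, List.cons_append, List.nil_append]
  simp [List.contains_eq_mem, h1,h2,h3,h4,h5,h6,h7,h8,h9,h10,h11,
        h12,h13,h14,h15,h16,h17,h18,h19,h20,h21,h22]

lemma pvGroupOf_none (k : String) (h : k ∉ pvAllWords) :
    pvGroupOf.get? k = none := by
  rw [pvGroupOf_eq, PySem.Dict.get?_eq_none_iff_not_mem_keys]
  simpa [pvAllWords] using h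

-- the A loop and the B double-lookup agree on all strings
lemma pvSyn_eq (p k : String) :
    pvSynLoop pvSynonyms p k =
      (match pvGroupOf.get? p with
       | none => false
       | some gp => pvGroupOf.get? k == some gp) := by
  by_cases hp : p ∈ pvAllWords
  · by_cases hk : k ∈ pvAllWords
    · fin_cases hp <;> fin_cases hk <;> decide
    · rw [pvLoop_false_right p k hk, pvGroupOf_none k hk]
      cases pvGroupOf.get? p <;> rfl
  · rw [pvLoop_false_left p k hp, pvGroupOf_none p hp]

-- ===== VERDICT (by name: the statement is the Claim_ definition above) =====
theorem relation_matches_py_spec : Claim_equal_relation_matches_py := by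
  intro p k _
  unfold Spec_relation_matches_py relation_matches_py relation_matches_py_alt
  by_cases h1 : pvNorm p == pvNorm k
  · simp [h1]
  · simp [h1, pvSyn_eq]
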